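-- pv_equiv track=rewrite | github.com/varun2107m/release-notes-automation | email_formatter.py | convert_to_html_table
-- ===== SOURCE A (Python) =====
-- def convert_to_html_table(data):
--     if not data:
--         return ""
--
--     from collections import defaultdict
--
--     headers = [h for h in data[0].keys() if h not in ("Category", "Section")]
--     col_count = len(headers)
--
--     html = """
--     <table style='border-collapse: collapse; width:100%; font-family: Arial, sans-serif; font-size:13px;'>
--     """
--
--     # Column headers
--     html += "<tr>"
--     for h in headers:
--         html += f"<th style='padding:8px 12px; background:#1F4E79; color:#ffffff; text-align:left; font-weight:600; border:1px solid #ccc;'>{h}</th>"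
--     html += "</tr>"
--
--     # Group rows by Category
--     grouped = defaultdict(list)
--     order = []
--     for row in data:
--         cat = row.get("Category", "Other")
--         if cat not in grouped:
--             order.append(cat)
--         grouped[cat].append(row)
--
--     category_labels = {
--         "Enhancement": "Enhancements",
--         "Feature": "New Features",
--         "Bug Fix": "Bug Fixes",
--     }
--
--     for i, cat in enumerate(order):
--         display_cat = category_labels.get(cat, cat)
--         html += f"<tr><td colspan='{col_count}' style='padding:7px 12px; background:#D6E4F0; font-weight:700; font-size:12px; text-transform:uppercase; letter-spacing:0.5px; border:1px solid #ccc; color:#1F4E79;'>{display_cat}</td></tr>"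
--         for j, row in enumerate(grouped[cat]):
--             bg = "#ffffff" if j % 2 == 0 else "#F7FAFD"
--             html += f"<tr style='background:{bg};'>"
--             for h in headers:
--                 html += f"<td style='padding:7px 12px; border:1px solid #ddd; vertical-align:top;'>{row.get(h, '')}</td>"
--             html += "</tr>"
--
--     html += "</table>"
--     return html
-- ===== SOURCE B (Python) =====
-- def convert_to_html_table(data):
--     if not data:
--         return ""
--
--     headers = [h for h in data[0].keys() if h not in ("Category", "Section")]
--
--     category_labels = {
--         "Enhancement": "Enhancements",
--         "Feature": "New Features",
--         "Bug Fix": "Bug Fixes",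
--     }
--
--     # First pass: ordered list of distinct categories (first occurrence wins).
--     cats = []
--     for row in data:
--         c = row.get("Category", "Other")
--         if c not in cats:
--             cats.append(c)
--
--     parts = [
--         """
--     <table style='border-collapse: collapse; width:100%; font-family: Arial, sans-serif; font-size:13px;'>
--     """,
--         "<tr>",
--         "".join(f"<th style='padding:8px 12px; background:#1F4E79; color:#ffffff; text-align:left; font-weight:600; border:1px solid #ccc;'>{h}</th>" for h in headers),
--         "</tr>",
--     ]
--
--     # For each category, re-scan data for its rows instead of keeping a grouped dict.
--     for cat in cats:
--         display_cat = category_labels.get(cat, cat)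
--         parts.append(f"<tr><td colspan='{len(headers)}' style='padding:7px 12px; background:#D6E4F0; font-weight:700; font-size:12px; text-transform:uppercase; letter-spacing:0.5px; border:1px solid #ccc; color:#1F4E79;'>{display_cat}</td></tr>")
--         matches = [row for row in data if row.get("Category", "Other") == cat]
--         parts.extend(
--             "<tr style='background:{};'>{}</tr>".format(
--                 "#ffffff" if j % 2 == 0 else "#F7FAFD",
--                 "".join(f"<td style='padding:7px 12px; border:1px solid #ddd; vertical-align:top;'>{row.get(h, '')}</td>" for h in headers),
--             )
--             for j, row in enumerate(matches)
--         )
--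
--     parts.append("</table>")
--     return "".join(parts)
-- ===== Notes on version B (the rewrite author's own statement) =====
-- stated objective: alternative
-- what changed: B replaces A's defaultdict grouping pass with a first-occurrence category list plus a per-category re-filter of data, and assembles the HTML by joining a list of fragments once instead of repeated string concatenation.
import Mathlib
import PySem

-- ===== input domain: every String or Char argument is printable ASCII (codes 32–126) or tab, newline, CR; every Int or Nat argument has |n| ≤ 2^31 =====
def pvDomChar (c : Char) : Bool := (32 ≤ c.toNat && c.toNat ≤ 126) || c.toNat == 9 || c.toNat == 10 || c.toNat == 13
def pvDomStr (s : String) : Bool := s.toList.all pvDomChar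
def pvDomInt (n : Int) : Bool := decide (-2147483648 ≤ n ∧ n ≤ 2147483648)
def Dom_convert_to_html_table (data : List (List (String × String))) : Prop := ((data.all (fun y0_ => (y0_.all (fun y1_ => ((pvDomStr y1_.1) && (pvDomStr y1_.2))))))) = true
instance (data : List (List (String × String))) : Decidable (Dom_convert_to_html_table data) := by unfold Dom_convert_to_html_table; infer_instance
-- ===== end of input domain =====

-- B builds a first-occurrence category list and re-filters data per category, emitting joined fragments,
-- instead of A's defaultdict grouping and incremental string concatenation (objective: alternative).
-- Shared template/accessor helpers (the literal f-string templates and dict-get of the Python source):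
def pvTableOpen : String := "\n    <table style='border-collapse: collapse; width:100%; font-family: Arial, sans-serif; font-size:13px;'>\n    "
def pvTh (h : String) : String := "<th style='padding:8px 12px; background:#1F4E79; color:#ffffff; text-align:left; font-weight:600; border:1px solid #ccc;'>" ++ h ++ "</th>"
def pvCatRow (n : Int) (d : String) : String := "<tr><td colspan='" ++ PySem.Int.toStr n ++ "' style='padding:7px 12px; background:#D6E4F0; font-weight:700; font-size:12px; text-transform:uppercase; letter-spacing:0.5px; border:1px solid #ccc; color:#1F4E79;'>" ++ d ++ "</td></tr>"
def pvTd (v : String) : String := "<td style='padding:7px 12px; border:1px solid #ddd; vertical-align:top;'>" ++ v ++ "</td>"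
def pvTrOpen (bg : String) : String := "<tr style='background:" ++ bg ++ ";'>"
def pvLabels : PySem.Dict String String := PySem.Dict.ofList [("Enhancement", "Enhancements"), ("Feature", "New Features"), ("Bug Fix", "Bug Fixes")]
def pvCat (row : List (String × String)) : String := (PySem.Dict.ofList row).getD "Category" "Other"
def pvGet (row : List (String × String)) (h : String) : String := (PySem.Dict.ofList row).getD h ""
def pvHeaders (first : List (String × String)) : List String := (PySem.Dict.ofList first).keys.filter (fun h => !(h == "Category" || h == "Section"))

-- ===== PORT A =====
def convert_to_html_table (data : List (List (String × String))) : String :=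
  match data with
  | [] => ""
  | first :: rest =>
    let data := first :: rest
    let headers := pvHeaders first
    let col_count : Int := (headers.length : Int)
    let html := pvTableOpen
    let html := html ++ "<tr>"
    let html := headers.foldl (fun acc h => acc ++ pvTh h) html
    let html := html ++ "</tr>"
    let st := data.foldl
      (fun (s : PySem.Dict String (List (List (String × String))) × List String) row =>
        let cat := pvCat row
        let order := if s.1.contains cat then s.2 else s.2 ++ [cat]
        (s.1.modify cat [] (fun xs => xs ++ [row]), order))
      (PySem.Dict.empty, [])
    let grouped := st.1
    let order := st.2
    let html := (PySem.List.enumerate order).foldl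
      (fun acc p =>
        let cat := p.2
        let display_cat := pvLabels.getD cat cat
        let acc := acc ++ pvCatRow col_count display_cat
        (PySem.List.enumerate (grouped.getD cat [])).foldl
          (fun acc2 q =>
            let bg := if PySem.Int.mod q.1 2 == 0 then "#ffffff" else "#F7FAFD"
            let acc2 := acc2 ++ pvTrOpen bg
            let acc2 := headers.foldl (fun a h => a ++ pvTd (pvGet q.2 h)) acc2
            acc2 ++ "</tr>")
          acc)
      html
    html ++ "</table>"

-- ===== PORT B =====
-- port of Python's "".join
def pvJoinAll (parts : List String) : String := parts.foldl (· ++ ·) ""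

def convert_to_html_table_alt (data : List (List (String × String))) : String :=
  match data with
  | [] => ""
  | first :: rest =>
    let data := first :: rest
    let headers := pvHeaders first
    let cats := data.foldl
      (fun cs row =>
        let c := pvCat row
        if cs.contains c then cs else cs ++ [c]) []
    let parts := [pvTableOpen, "<tr>", pvJoinAll (headers.map pvTh), "</tr>"]
    let parts := cats.foldl
      (fun ps cat =>
        let ms := data.filter (fun row => pvCat row == cat)
        ps ++ ([pvCatRow (headers.length : Int) (pvLabels.getD cat cat)]
          ++ (PySem.List.enumerate ms).map (fun q =>
               pvTrOpen (if PySem.Int.mod q.1 2 == 0 then "#ffffff" else "#F7FAFD")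
                 ++ pvJoinAll (headers.map (fun h => pvTd (pvGet q.2 h))) ++ "</tr>")))
      parts
    pvJoinAll (parts ++ ["</table>"])

-- ===== PRECONDITION & SPEC =====
def Spec_convert_to_html_table (data : List (List (String × String))) (out : String) : Prop := out = convert_to_html_table_alt data
instance (data : List (List (String × String))) (out : String) : Decidable (Spec_convert_to_html_table data out) := by unfold Spec_convert_to_html_table; infer_instance

-- ===== CLAIM (what is proved, stated in full; the proofs are below) =====
def Claim_equal_convert_to_html_table : Prop := ∀ (data : List (List (String × String))), Dom_convert_to_html_table data → Spec_convert_to_html_table data (convert_to_html_table data)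

-- ===== LEMMAS AND PROOFS =====

theorem pvJoinAll_seed (l : List String) : ∀ s : String, l.foldl (· ++ ·) s = s ++ pvJoinAll l := by
  induction l with
  | nil => intro s; simp [pvJoinAll]
  | cons x xs ih =>
    intro s
    simp only [pvJoinAll, List.foldl_cons]
    rw [ih (s ++ x), ih ("" ++ x)]
    simp [String.append_assoc]

theorem pvJoinAll_cons (x : String) (xs : List String) : pvJoinAll (x :: xs) = x ++ pvJoinAll xs := by
  have h0 : pvJoinAll (x :: xs) = List.foldl (· ++ ·) ("" ++ x) xs := rfl
  rw [h0, pvJoinAll_seed xs ("" ++ x), String.empty_append]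

theorem pvJoinAll_append (l1 l2 : List String) : pvJoinAll (l1 ++ l2) = pvJoinAll l1 ++ pvJoinAll l2 := by
  simp only [pvJoinAll, List.foldl_append]
  rw [pvJoinAll_seed l2 (List.foldl (· ++ ·) "" l1)]
  rfl

theorem pvJoinAll_flatMap {α : Type} (g : α → List String) (l : List α) :
    pvJoinAll (l.flatMap g) = pvJoinAll (l.map (fun x => pvJoinAll (g x))) := by
  induction l with
  | nil => rfl
  | cons x xs ih =>
    rw [List.flatMap_cons, pvJoinAll_append, List.map_cons, pvJoinAll_cons, ih]

theorem pvMapSndEnum {α β : Type} (F : α → β) (l : List α) :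
    (PySem.List.enumerate l 0).map (fun p => F p.2) = l.map F := by
  have h1 : (PySem.List.enumerate l 0).map (fun p => F p.2)
      = ((PySem.List.enumerate l 0).map (fun p => p.2)).map F := by
    rw [List.map_map]; rfl
  rw [h1, PySem.List.map_snd_enumerate]


-- a left fold that appends f x at each step is the seed followed by the joined fragments
theorem pvGenFold {α : Type} (g : String → α → String) (f : α → String)
    (h : ∀ a x, g a x = a ++ f x) (l : List α) (s : String) :
    l.foldl g s = s ++ pvJoinAll (l.map f) := by
  have hg : g = fun a x => a ++ f x := funext fun a => funext fun x => h a x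
  subst hg
  rw [← List.foldl_map (f := f) (g := fun (a : String) (x : String) => a ++ x)]
  exact pvJoinAll_seed (l.map f) s

-- A's grouping fold: the order component is the keys of the grouped dict
theorem pvAloop (l : List (List (String × String)))
    (g : PySem.Dict String (List (List (String × String)))) (ord : List String)
    (h : ord = g.keys) :
    l.foldl
      (fun (s : PySem.Dict String (List (List (String × String))) × List String) row =>
        let cat := pvCat row
        let order := if s.1.contains cat then s.2 else s.2 ++ [cat]
        (s.1.modify cat [] (fun xs => xs ++ [row]), order)) (g, ord)
    = (l.foldl (fun d row => d.modify (pvCat row) [] (fun xs => xs ++ [row])) g,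
       (l.foldl (fun d row => d.modify (pvCat row) [] (fun xs => xs ++ [row])) g).keys) := by
  induction l generalizing g ord with
  | nil => simp [h]
  | cons r rs ih =>
    simp only [List.foldl_cons]
    apply ih
    rw [PySem.Dict.keys_modify]
    by_cases hc : g.contains (pvCat r)
    · rw [PySem.Dict.keys_insert_of_contains _ _ hc, hc, if_pos rfl, h]
    · rw [PySem.Dict.keys_insert_of_not_contains _ _ (by simpa using hc),
        (by simpa using hc : g.contains (pvCat r) = false)]
      simp [h]

-- the grouped dict's entry for cat is exactly the filter of data on cat
theorem pvGroupedGetD (data : List (List (String × String))) (cat : String) :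
    (data.foldl (fun d row => d.modify (pvCat row) [] (fun xs => xs ++ [row]))
      (PySem.Dict.empty : PySem.Dict String (List (List (String × String))))).getD cat []
    = data.filter (fun row => pvCat row == cat) := by
  rw [← List.foldl_map (f := fun row => (pvCat row, row))
      (g := fun (d : PySem.Dict String (List (List (String × String)))) p =>
        d.modify p.1 [] (fun xs => xs ++ [p.2]))]
  rw [PySem.Dict.getD_foldl_modify_append]
  simp [List.filter_map, Function.comp_def]

-- A's insertion order of categories equals B's first-occurrence scan
theorem pvOrderEq (data : List (List (String × String))) :
    (data.foldl (fun d row => d.modify (pvCat row) [] (fun xs => xs ++ [row]))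
      (PySem.Dict.empty : PySem.Dict String (List (List (String × String))))).keys
    = data.foldl (fun cs row =>
        let c := pvCat row
        if cs.contains c then cs else cs ++ [c]) [] := by
  rw [PySem.Dict.keys_foldl_modify_key data pvCat [] (fun _ row xs => xs ++ [row])]
  rw [PySem.Dict.keys_empty, PySem.Set.update_map_eq_foldl_add]
  rfl

-- ===== VERDICT (by name: the statement is the Claim_ definition above) =====
theorem convert_to_html_table_spec : Claim_equal_convert_to_html_table := by
  intro data _
  unfold Spec_convert_to_html_table
  cases data with
  | nil => simp [convert_to_html_table, convert_to_html_table_alt]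
  | cons first rest =>
    simp only [convert_to_html_table, convert_to_html_table_alt]
    rw [pvAloop (first :: rest) PySem.Dict.empty [] (by simp)]
    set G := (first :: rest).foldl (fun d row => d.modify (pvCat row) [] (fun xs => xs ++ [row]))
      (PySem.Dict.empty : PySem.Dict String (List (List (String × String)))) with hG
    -- inner row rendering, then category rendering, then the whole table
    have hrow : ∀ (rows : List (List (String × String))) (acc : String),
        (PySem.List.enumerate rows).foldl
          (fun acc2 q =>
            let bg := if PySem.Int.mod q.1 2 == 0 then "#ffffff" else "#F7FAFD"
            let acc2 := acc2 ++ pvTrOpen bg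
            let acc2 := (pvHeaders first).foldl (fun a h => a ++ pvTd (pvGet q.2 h)) acc2
            acc2 ++ "</tr>") acc
        = acc ++ pvJoinAll ((PySem.List.enumerate rows).map (fun q =>
            pvTrOpen (if PySem.Int.mod q.1 2 == 0 then "#ffffff" else "#F7FAFD")
              ++ pvJoinAll ((pvHeaders first).map (fun h => pvTd (pvGet q.2 h))) ++ "</tr>")) := by
      intro rows acc
      apply pvGenFold
      intro a q
      simp only
      rw [pvGenFold (fun a h => a ++ pvTd (pvGet q.2 h)) (fun h => pvTd (pvGet q.2 h))
        (fun _ _ => rfl)]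
      simp [String.append_assoc]
    have hcat : (PySem.List.enumerate ((first :: rest).foldl (fun cs row =>
          let c := pvCat row
          if cs.contains c then cs else cs ++ [c]) [])).foldl
        (fun acc p =>
          let cat := p.2
          let display_cat := pvLabels.getD cat cat
          let acc := acc ++ pvCatRow ((pvHeaders first).length : Int) display_cat
          (PySem.List.enumerate (G.getD cat [])).foldl
            (fun acc2 q =>
              let bg := if PySem.Int.mod q.1 2 == 0 then "#ffffff" else "#F7FAFD"
              let acc2 := acc2 ++ pvTrOpen bg
              let acc2 := (pvHeaders first).foldl (fun a h => a ++ pvTd (pvGet q.2 h)) acc2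
              acc2 ++ "</tr>") acc)
        (((pvTableOpen ++ "<tr>") ++ pvJoinAll ((pvHeaders first).map pvTh)) ++ "</tr>")
        = (((pvTableOpen ++ "<tr>") ++ pvJoinAll ((pvHeaders first).map pvTh)) ++ "</tr>")
          ++ pvJoinAll ((((first :: rest).foldl (fun cs row =>
              let c := pvCat row
              if cs.contains c then cs else cs ++ [c]) []).map (fun cat =>
                pvCatRow ((pvHeaders first).length : Int) (pvLabels.getD cat cat)
                ++ pvJoinAll ((PySem.List.enumerate ((first :: rest).filter (fun row => pvCat row == cat))).map
                    (fun q =>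
                      pvTrOpen (if PySem.Int.mod q.1 2 == 0 then "#ffffff" else "#F7FAFD")
                        ++ pvJoinAll ((pvHeaders first).map (fun h => pvTd (pvGet q.2 h))) ++ "</tr>"))))) := by
      rw [pvGenFold _ (fun (p : Int × String) =>
          pvCatRow ((pvHeaders first).length : Int) (pvLabels.getD p.2 p.2)
          ++ pvJoinAll ((PySem.List.enumerate ((first :: rest).filter (fun row => pvCat row == p.2))).map
              (fun q =>
                pvTrOpen (if PySem.Int.mod q.1 2 == 0 then "#ffffff" else "#F7FAFD")
                  ++ pvJoinAll ((pvHeaders first).map (fun h => pvTd (pvGet q.2 h))) ++ "</tr>")))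
        (by
          intro a p
          simp only
          rw [hrow, hG, pvGroupedGetD]
          simp [String.append_assoc])]
      congr 2
      exact pvMapSndEnum (fun cat =>
        pvCatRow ((pvHeaders first).length : Int) (pvLabels.getD cat cat)
          ++ pvJoinAll ((PySem.List.enumerate ((first :: rest).filter (fun row => pvCat row == cat))).map
              (fun q =>
                pvTrOpen (if PySem.Int.mod q.1 2 == 0 then "#ffffff" else "#F7FAFD")
                  ++ pvJoinAll ((pvHeaders first).map (fun h => pvTd (pvGet q.2 h))) ++ "</tr>"))) _
    simp only []
    rw [pvGenFold (fun acc h => acc ++ pvTh h) pvTh (fun _ _ => rfl)]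
    rw [← pvOrderEq (first :: rest), ← hG] at hcat
    rw [hcat]
    rw [PySem.List.foldl_append_eq_flatMap, List.append_assoc, pvJoinAll_append, pvJoinAll_append,
      pvJoinAll_flatMap]
    simp only [pvOrderEq (first :: rest), hG]
    simp only [List.singleton_append, pvJoinAll_cons]
    simp [String.append_assoc, show pvJoinAll [] = "" from rfl]
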